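-- pv_equiv track=rewrite | github.com/vortydev/sanctum-library | scan_book.py | extract_unique_genres
-- ===== SOURCE A (Python) =====
-- def extract_unique_genres(genres: list[str]) -> list[str]:
--     """
--     Ensure only unique, normalized genres are included.
--     :param genres: List of genre names
--     :return: List of unique genre names
--     """
--     seen = set()
--     unique_genres = []
--     for genre in genres:
--         # Split by comma, normalize, and process each sub-genre
--         for sub_genre in genre.split(","):
--             normalized_genre = sub_genre.lower().strip()
--             if normalized_genre and normalized_genre not in seen:
--                 seen.add(normalized_genre)
--                 unique_genres.append(normalized_genre.capitalize())  # Append the normalized genre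
--     return sorted(unique_genres)
-- ===== SOURCE B (Python) =====
-- def extract_unique_genres(genres: list[str]) -> list[str]:
--     """
--     Ensure only unique, normalized genres are included.
--     :param genres: List of genre names
--     :return: List of unique genre names
--     """
--     # Sort-then-scan deduplication: collect ALL capitalized normalized tokens
--     # (duplicates included), sort, then drop empties and adjacent repeats.
--     toks = sorted(s.lower().strip().capitalize() for g in genres for s in g.split(","))
--     out = []
--     for t in toks:
--         if t and (not out or out[-1] != t):
--             out.append(t)
--     return out
-- ===== Notes on version B (the rewrite author's own statement) =====
-- stated objective: alternative
-- what changed: A deduplicates on the fly with a hash set and an append-only parallel list, then sorts the unique capitalized tokens; B collects ALL capitalized normalized tokens including duplicates, sorts the whole multiset, and removes empties and adjacent repeats in one linear scan (sort-then-scan dedup, no set), correct because capitalize is injective on already-lowercased tokens and equal tokens are adjacent after sorting.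
import Mathlib
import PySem

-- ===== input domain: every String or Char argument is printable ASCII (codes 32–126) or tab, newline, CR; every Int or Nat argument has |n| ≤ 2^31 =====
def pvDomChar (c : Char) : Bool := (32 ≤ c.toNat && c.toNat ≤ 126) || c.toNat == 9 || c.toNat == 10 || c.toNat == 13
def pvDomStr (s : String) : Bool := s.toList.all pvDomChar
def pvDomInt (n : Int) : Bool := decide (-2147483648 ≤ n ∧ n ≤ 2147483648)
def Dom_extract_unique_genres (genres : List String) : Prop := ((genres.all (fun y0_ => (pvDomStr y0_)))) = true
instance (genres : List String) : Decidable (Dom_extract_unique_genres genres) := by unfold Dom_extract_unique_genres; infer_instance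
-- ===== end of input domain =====

-- B replaces A's hash-set deduplication by sort-then-scan: it collects ALL capitalized
-- normalized tokens (duplicates included), sorts them, and drops empties and adjacent
-- repeats in one scan. Return value only; neither version mutates its argument.

-- str.capitalize: first char uppercased, rest lowercased — exact on ASCII
def capChars : List Char → List Char
  | [] => []
  | c :: t => PySem.Chars.upperChar c :: PySem.Chars.lower t

def pyCapitalize (s : String) : String := String.ofList (capChars s.toList)

-- ===== PORT A =====
def extract_unique_genres (genres : List String) : List String :=
  let st := genres.foldl (fun (st : PySem.Set String × List String) genre =>
    ((PySem.Str.split? genre ",").getD []).foldl (fun st sub_genre =>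
      let normalized_genre := PySem.Str.strip (PySem.Str.lower sub_genre)
      if normalized_genre ≠ "" ∧ ¬ (PySem.Set.contains st.1 normalized_genre = true) then
        (PySem.Set.add st.1 normalized_genre, st.2 ++ [pyCapitalize normalized_genre])
      else st) st) (PySem.Set.empty, [])
  PySem.List.sorted st.2 (fun x => x) false

-- ===== PORT B =====
def extract_unique_genres_alt (genres : List String) : List String :=
  let toks := PySem.List.sorted
    (genres.flatMap (fun g => ((PySem.Str.split? g ",").getD []).map
      (fun s => pyCapitalize (PySem.Str.strip (PySem.Str.lower s))))) (fun x => x) false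
  toks.foldl (fun out t =>
    if t ≠ "" ∧ (out = [] ∨ out.getLast? ≠ some t) then out ++ [t] else out) []

-- ===== PRECONDITION & SPEC =====
def Spec_extract_unique_genres (genres : List String) (out : List String) : Prop := out = extract_unique_genres_alt genres
instance (genres : List String) (out : List String) : Decidable (Spec_extract_unique_genres genres out) := by unfold Spec_extract_unique_genres; infer_instance

-- ===== CLAIM (what is proved, stated in full; the proofs are below) =====
def Claim_equal_extract_unique_genres : Prop := ∀ (genres : List String), Dom_extract_unique_genres genres → Spec_extract_unique_genres genres (extract_unique_genres genres)

-- ===== LEMMAS AND PROOFS =====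

theorem char_toNat_val (c : Char) : c.val.toNat = c.toNat := rfl

-- lowercasing never yields an ASCII uppercase letter
theorem noupper_lowerChar (c : Char) : PySem.Chars.isupper (PySem.Chars.lowerChar c) = false := by
  simp only [PySem.Chars.lowerChar, PySem.Chars.isupper]
  by_cases h : (decide ('A' ≤ c) && decide (c ≤ 'Z')) = true
  · simp only [h, if_true]
    simp only [Bool.and_eq_true, decide_eq_true_eq, Char.le_def,
      UInt32.le_iff_toNat_le, char_toNat_val] at h ⊢
    have hA : ('A' : Char).toNat = 65 := rfl
    have hZ : ('Z' : Char).toNat = 90 := rfl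
    rw [hA, hZ] at h
    have hv : (c.toNat + 32).isValidChar := by left; omega
    have key : (Char.ofNat (c.toNat + 32)).toNat = c.toNat + 32 := by
      rw [Char.toNat_ofNat, if_pos hv]
    rw [key, hA, hZ]
    simp only [Bool.and_eq_false_iff, decide_eq_false_iff_not, not_le]
    omega
  · simp only [h]
    simpa using h


-- upperChar is injective on characters that are not uppercase
theorem upperChar_inj {c d : Char} (hc : PySem.Chars.isupper c = false)
    (hd : PySem.Chars.isupper d = false)
    (h : PySem.Chars.upperChar c = PySem.Chars.upperChar d) : c = d := by
  have hext : ∀ a b : Char, a.toNat = b.toNat → a = b := by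
    intro a b hab
    apply Char.ext
    exact UInt32.toNat_inj.mp hab
  simp only [PySem.Chars.isupper, Bool.and_eq_false_iff, decide_eq_false_iff_not,
    Char.le_def, UInt32.le_iff_toNat_le, char_toNat_val, not_le] at hc hd
  have hA : ('A' : Char).toNat = 65 := rfl
  have hZ : ('Z' : Char).toNat = 90 := rfl
  rw [hA, hZ] at hc hd
  simp only [PySem.Chars.upperChar, PySem.Chars.islower] at h
  have ha : ('a' : Char).toNat = 97 := rfl
  have hz : ('z' : Char).toNat = 122 := rfl
  have keyv : ∀ e : Char, 97 ≤ e.toNat → e.toNat ≤ 122 → (Char.ofNat (e.toNat - 32)).toNat = e.toNat - 32 := by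
    intro e h1 h2
    rw [Char.toNat_ofNat, if_pos]
    left; omega
  by_cases h1 : (decide ('a' ≤ c) && decide (c ≤ 'z')) = true <;>
  by_cases h2 : (decide ('a' ≤ d) && decide (d ≤ 'z')) = true <;>
  simp only [h1, h2, if_true] at h <;>
  simp only [Bool.and_eq_true, decide_eq_true_eq, Char.le_def, UInt32.le_iff_toNat_le,
    char_toNat_val, ha, hz] at h1 h2
  · apply hext
    have e1 := keyv c h1.1 h1.2
    have e2 := keyv d h2.1 h2.2
    have := congrArg Char.toNat h
    rw [e1, e2] at this
    omega
  · -- c lower, d not: upperChar c is uppercase, d is not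
    exfalso
    have e1 := keyv c h1.1 h1.2
    have := congrArg Char.toNat h
    rw [e1] at this
    simp only [Bool.false_eq_true, if_false] at this
    omega
  · exfalso
    have e2 := keyv d h2.1 h2.2
    have := congrArg Char.toNat h
    rw [e2] at this
    simp only [Bool.false_eq_true, if_false] at this
    omega
  · exact h


-- every character of strip(lower(v)) is non-uppercase
theorem noupper_norm (v : String) (c : Char)
    (hc : c ∈ (PySem.Str.strip (PySem.Str.lower v)).toList) :
    PySem.Chars.isupper c = false := by
  have h1 : (PySem.Str.strip (PySem.Str.lower v)).toList
      = PySem.Chars.strip (PySem.Chars.lower v.toList) := by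
    simp [pysem]
  rw [h1] at hc
  have h2 : c ∈ PySem.Chars.lower v.toList := by
    have := (List.dropWhile_sublist (l := (PySem.Chars.lstrip (PySem.Chars.lower v.toList)).reverse)
      PySem.Chars.isspace).subset
    have h3 : c ∈ PySem.Chars.lstrip (PySem.Chars.lower v.toList) := by
      simp only [PySem.Chars.strip, PySem.Chars.rstrip] at hc
      rw [List.mem_reverse] at hc
      have := this hc
      rwa [List.mem_reverse] at this
    exact (List.dropWhile_sublist (l := PySem.Chars.lower v.toList) PySem.Chars.isspace).subset h3
  simp only [PySem.Chars.lower, List.mem_map] at h2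
  obtain ⟨d, _, rfl⟩ := h2
  exact noupper_lowerChar d


-- capitalize is injective on strings without uppercase characters
theorem pyCapitalize_inj {s t : String}
    (hs : ∀ c ∈ s.toList, PySem.Chars.isupper c = false)
    (ht : ∀ c ∈ t.toList, PySem.Chars.isupper c = false)
    (h : pyCapitalize s = pyCapitalize t) : s = t := by
  have h' : capChars s.toList = capChars t.toList := by
    have := congrArg String.toList h
    simpa [pyCapitalize, String.toList_ofList] using this
  have lfix : ∀ (l : List Char), (∀ c ∈ l, PySem.Chars.isupper c = false) →
      PySem.Chars.lower l = l := by
    intro l hl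
    simp only [PySem.Chars.lower]
    have hcg : ∀ c ∈ l, PySem.Chars.lowerChar c = (id c : Char) :=
      fun c hc => by simp [PySem.Chars.lowerChar, hl c hc]
    rw [List.map_congr_left hcg, List.map_id]
  have : s.toList = t.toList := by
    match hms : s.toList, hmt : t.toList with
    | [], [] => rfl
    | [], c :: u => rw [hms, hmt] at h'; simp [capChars] at h'
    | c :: u, [] => rw [hms, hmt] at h'; simp [capChars] at h'
    | c :: u, d :: w =>
      rw [hms, hmt] at h'
      simp only [capChars, List.cons.injEq] at h'
      rw [hms] at hs; rw [hmt] at ht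
      rw [lfix u (fun x hx => hs x (List.mem_cons_of_mem _ hx)),
          lfix w (fun x hx => ht x (List.mem_cons_of_mem _ hx))] at h'
      exact List.cons_eq_cons.mpr ⟨upperChar_inj (hs c List.mem_cons_self) (ht d List.mem_cons_self) h'.1, h'.2⟩
  calc s = String.ofList s.toList := by simp
    _ = String.ofList t.toList := by rw [this]
    _ = t := by simp


theorem pyCapitalize_eq_empty_iff (s : String) : pyCapitalize s = "" ↔ s = "" := by
  constructor
  · intro h
    have := congrArg String.toList h
    simp only [pyCapitalize, String.toList_ofList] at this
    match hm : s.toList with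
    | [] => exact String.ext (by simpa using hm)
    | c :: u => rw [hm] at this; simp [capChars] at this
  · intro h; subst h; rfl


-- one inner (comma-split) pass of A: pair state tracks the seen-set, out = seen mapped by capitalize
theorem inner_invariant (subs : List String) (s : PySem.Set String) :
    subs.foldl (fun st sub_genre =>
      let ng := PySem.Str.strip (PySem.Str.lower sub_genre)
      if ng ≠ "" ∧ ¬ (PySem.Set.contains st.1 ng = true) then
        (PySem.Set.add st.1 ng, st.2 ++ [pyCapitalize ng])
      else st) (s, s.map pyCapitalize)
    = (let s' := subs.foldl (fun seen sub_genre =>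
        let ng := PySem.Str.strip (PySem.Str.lower sub_genre)
        if ng ≠ "" then PySem.Set.add seen ng else seen) s
       (s', s'.map pyCapitalize)) := by
  induction subs generalizing s with
  | nil => rfl
  | cons sub rest ih =>
    simp only [List.foldl_cons]
    set ng := PySem.Str.strip (PySem.Str.lower sub) with hng
    by_cases h0 : ng = ""
    · simp only [h0, ne_eq, not_true_eq_false, false_and, if_neg, not_false_eq_true]
      exact ih s
    · by_cases hc : PySem.Set.contains s ng = true
      · have hc' : ng ∈ s := by simpa using hc
        have hadd : PySem.Set.add s ng = s := by
          simp [PySem.Set.add, hc']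
        simp only [h0, ne_eq, not_false_eq_true, true_and, hc, not_true_eq_false, if_false, if_true, hadd]
        exact ih s
      · have hc' : ng ∉ s := by simpa using hc
        have hadd : PySem.Set.add s ng = s ++ [ng] := by
          simp [PySem.Set.add, hc']
        simp only [h0, ne_eq, not_false_eq_true, true_and, hc, not_false_eq_true, if_true, hadd]
        have : (s ++ [ng]).map pyCapitalize = s.map pyCapitalize ++ [pyCapitalize ng] := by
          simp
        rw [← this]
        exact ih (s ++ [ng])

-- A's whole loop, lifted over the outer fold
theorem outer_invariant (genres : List String) (s : PySem.Set String) :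
    genres.foldl (fun st genre =>
      ((PySem.Str.split? genre ",").getD []).foldl (fun st sub_genre =>
        let ng := PySem.Str.strip (PySem.Str.lower sub_genre)
        if ng ≠ "" ∧ ¬ (PySem.Set.contains st.1 ng = true) then
          (PySem.Set.add st.1 ng, st.2 ++ [pyCapitalize ng])
        else st) st) (s, s.map pyCapitalize)
    = (let s' := genres.foldl (fun seen genre =>
        ((PySem.Str.split? genre ",").getD []).foldl (fun seen sub_genre =>
          let ng := PySem.Str.strip (PySem.Str.lower sub_genre)
          if ng ≠ "" then PySem.Set.add seen ng else seen) seen) s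
       (s', s'.map pyCapitalize)) := by
  induction genres generalizing s with
  | nil => rfl
  | cons g rest ih =>
    simp only [List.foldl_cons]
    rw [inner_invariant]
    exact ih _

-- the seen-set A accumulates is exactly set() of the nonempty normalized tokens
theorem seen_eq_ofList (genres : List String) :
    genres.foldl (fun seen genre =>
      ((PySem.Str.split? genre ",").getD []).foldl (fun seen sub_genre =>
        let ng := PySem.Str.strip (PySem.Str.lower sub_genre)
        if ng ≠ "" then PySem.Set.add seen ng else seen) seen) PySem.Set.empty
    = PySem.Set.ofList
        (((genres.flatMap (fun g => (PySem.Str.split? g ",").getD [])).map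
          (fun s => PySem.Str.strip (PySem.Str.lower s))).filter (fun x => decide (x ≠ ""))) := by
  rw [← List.foldl_flatMap]
  rw [PySem.List.foldl_ite_eq_foldl_filter
    (p := fun sub => PySem.Str.strip (PySem.Str.lower sub) ≠ "")
    (f := fun seen sub => PySem.Set.add seen (PySem.Str.strip (PySem.Str.lower sub)))]
  rw [PySem.Set.ofList_eq_foldl, List.filter_map, List.foldl_map]
  simp only [Function.comp_def]
  rfl


-- a member of a strictly increasing list is ≤ its last element
theorem mem_le_getLast? {l : List String} {a x : String}
    (h : l.Pairwise (· < ·)) (ha : a ∈ l) (hx : l.getLast? = some x) : a ≤ x := by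
  induction l with
  | nil => simp at ha
  | cons b t ih =>
    match t with
    | [] =>
      simp at ha hx
      simp [ha, hx]
    | c :: u =>
      rw [List.getLast?_cons_cons] at hx
      rcases List.mem_cons.mp ha with rfl | hmem
      · have hxmem : x ∈ c :: u := List.mem_of_getLast? hx
        have := (List.pairwise_cons.mp h).1 x hxmem
        exact le_of_lt this
      · exact ih (List.pairwise_cons.mp h).2 hmem hx


-- B's scan over a ≤-sorted list yields a strictly increasing list holding
-- exactly the nonempty elements (plus the accumulator)
theorem dedup_scan (T : List String) (acc : List String)
    (hT : T.Pairwise (· ≤ ·)) (hacc : acc.Pairwise (· < ·))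
    (hbound : ∀ a ∈ acc, ∀ t ∈ T, a ≤ t) (hne : "" ∉ acc) :
    (T.foldl (fun out t =>
      if t ≠ "" ∧ (out = [] ∨ out.getLast? ≠ some t) then out ++ [t] else out) acc).Pairwise (· < ·)
    ∧ ∀ x, x ∈ T.foldl (fun out t =>
        if t ≠ "" ∧ (out = [] ∨ out.getLast? ≠ some t) then out ++ [t] else out) acc
        ↔ x ∈ acc ∨ (x ∈ T ∧ x ≠ "") := by
  induction T generalizing acc with
  | nil =>
    refine ⟨hacc, fun x => ?_⟩
    simp
  | cons t T' ih =>
    obtain ⟨hhead, hT'⟩ := List.pairwise_cons.mp hT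
    simp only [List.foldl_cons]
    by_cases h0 : t = ""
    · subst h0
      rw [if_neg (by simp)]
      obtain ⟨hp, hm⟩ := ih acc hT' hacc
        (fun a ha t' ht' => hbound a ha t' (List.mem_cons_of_mem _ ht')) hne
      refine ⟨hp, fun x => ?_⟩
      rw [hm x]
      constructor
      · rintro (h | ⟨h1, h2⟩)
        · exact Or.inl h
        · exact Or.inr ⟨List.mem_cons_of_mem _ h1, h2⟩
      · rintro (h | ⟨h1, h2⟩)
        · exact Or.inl h
        · rcases List.mem_cons.mp h1 with rfl | h1
          · exact absurd rfl h2
          · exact Or.inr ⟨h1, h2⟩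
    · by_cases hskip : acc ≠ [] ∧ acc.getLast? = some t
      · -- t equals the last element of acc: skipped
        rw [if_neg (by
          rintro ⟨-, h | h⟩
          · exact hskip.1 h
          · exact h hskip.2)]
        have htmem : t ∈ acc := List.mem_of_getLast? hskip.2
        obtain ⟨hp, hm⟩ := ih acc hT' hacc
          (fun a ha t' ht' => hbound a ha t' (List.mem_cons_of_mem _ ht')) hne
        refine ⟨hp, fun x => ?_⟩
        rw [hm x]
        constructor
        · rintro (h | ⟨h1, h2⟩)
          · exact Or.inl h
          · exact Or.inr ⟨List.mem_cons_of_mem _ h1, h2⟩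
        · rintro (h | ⟨h1, h2⟩)
          · exact Or.inl h
          · rcases List.mem_cons.mp h1 with rfl | h1
            · exact Or.inl htmem
            · exact Or.inr ⟨h1, h2⟩
      · -- appended
        rw [if_pos (by
          refine ⟨h0, ?_⟩
          by_cases he : acc = []
          · exact Or.inl he
          · refine Or.inr (fun hlast => hskip ⟨he, hlast⟩))]
        have hlt : ∀ a ∈ acc, a < t := by
          intro a ha
          have hle : a ≤ t := hbound a ha t List.mem_cons_self
          rcases eq_or_lt_of_le hle with rfl | h
          · exfalso
            have hne' : acc ≠ [] := List.ne_nil_of_mem ha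
            obtain ⟨l, hl⟩ := Option.isSome_iff_exists.mp (List.getLast?_isSome.mpr hne')
            have h1 : a ≤ l := mem_le_getLast? hacc ha hl
            have h2 : l ≤ a := hbound l (List.mem_of_getLast? hl) a List.mem_cons_self
            exact hskip ⟨hne', by rw [hl, le_antisymm h2 h1]⟩
          · exact h
        have hacc2 : (acc ++ [t]).Pairwise (· < ·) := by
          rw [List.pairwise_append]
          exact ⟨hacc, List.pairwise_singleton _ _, fun a ha b hb => by
            rw [List.mem_singleton.mp hb]; exact hlt a ha⟩
        obtain ⟨hp, hm⟩ := ih (acc ++ [t]) hT' hacc2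
          (by
            intro a ha t' ht'
            rcases List.mem_append.mp ha with ha | ha
            · exact hbound a ha t' (List.mem_cons_of_mem _ ht')
            · rw [List.mem_singleton.mp ha]; exact hhead t' ht')
          (by
            intro hmem
            rcases List.mem_append.mp hmem with hmem | hmem
            · exact hne hmem
            · exact h0 (List.mem_singleton.mp hmem).symm)
        refine ⟨hp, fun x => ?_⟩
        rw [hm x]
        constructor
        · rintro (h | ⟨h1, h2⟩)
          · rcases List.mem_append.mp h with h | h
            · exact Or.inl h
            · rw [List.mem_singleton.mp h]
              exact Or.inr ⟨List.mem_cons_self, h0⟩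
          · exact Or.inr ⟨List.mem_cons_of_mem _ h1, h2⟩
        · rintro (h | ⟨h1, h2⟩)
          · exact Or.inl (List.mem_append.mpr (Or.inl h))
          · rcases List.mem_cons.mp h1 with rfl | h1
            · exact Or.inl (List.mem_append.mpr (Or.inr (List.mem_singleton.mpr rfl)))
            · exact Or.inr ⟨h1, h2⟩


-- ===== VERDICT (by name: the statement is the Claim_ definition above) =====
theorem extract_unique_genres_spec : Claim_equal_extract_unique_genres := by
  intro genres _
  unfold Spec_extract_unique_genres extract_unique_genres extract_unique_genres_alt

  rw [show ((PySem.Set.empty, []) : PySem.Set String × List String)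
        = (PySem.Set.empty, (PySem.Set.empty : PySem.Set String).map pyCapitalize) from rfl,
      outer_invariant, seen_eq_ofList]
  simp only []
  set L := genres.flatMap (fun g => (PySem.Str.split? g ",").getD []) with hL
  set M := ((L.map (fun s => PySem.Str.strip (PySem.Str.lower s))).filter
      (fun x => decide (x ≠ ""))) with hM
  have hflat : genres.flatMap (fun g => ((PySem.Str.split? g ",").getD []).map
      (fun s => pyCapitalize (PySem.Str.strip (PySem.Str.lower s))))
      = L.map (fun s => pyCapitalize (PySem.Str.strip (PySem.Str.lower s))) := by
    rw [hL, List.map_flatMap]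
  rw [hflat]
  set T := PySem.List.sorted (L.map (fun s => pyCapitalize (PySem.Str.strip (PySem.Str.lower s))))
      (fun x => x) false with hT
  have hTp : T.Pairwise (· ≤ ·) := PySem.List.sorted_pairwise _ _
  obtain ⟨hp, hm⟩ := dedup_scan T [] hTp List.Pairwise.nil
    (by intro a ha; simp at ha) (by simp)
  -- the scan result is nodup
  have hrnd : (T.foldl (fun out t =>
      if t ≠ "" ∧ (out = [] ∨ out.getLast? ≠ some t) then out ++ [t] else out) []).Nodup :=
    hp.imp (fun h => ne_of_lt h)
  -- every element of M is a normalization output, hence has no uppercase chars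
  have hMnu : ∀ u ∈ M, ∀ c ∈ u.toList, PySem.Chars.isupper c = false := by
    intro u hu
    have := List.mem_of_mem_filter hu
    obtain ⟨v, _, rfl⟩ := List.mem_map.mp this
    exact noupper_norm v
  have hsnd : ((PySem.Set.ofList M).map pyCapitalize).Nodup := by
    refine List.Nodup.map_on ?_ (PySem.Set.nodup_ofList M)
    intro x hx y hy hxy
    have hx' := (PySem.Set.mem_ofList M x).mp hx
    have hy' := (PySem.Set.mem_ofList M y).mp hy
    exact pyCapitalize_inj (hMnu x hx') (hMnu y hy') hxy
  have hmem : ∀ x, x ∈ (T.foldl (fun out t =>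
      if t ≠ "" ∧ (out = [] ∨ out.getLast? ≠ some t) then out ++ [t] else out) [])
      ↔ x ∈ (PySem.Set.ofList M).map pyCapitalize := by
    intro x
    rw [hm x]
    simp only [List.not_mem_nil, false_or]
    constructor
    · rintro ⟨hxT, hx0⟩
      have hxL : x ∈ L.map (fun s => pyCapitalize (PySem.Str.strip (PySem.Str.lower s))) :=
        (PySem.List.sorted_perm _ _ _).mem_iff.mp hxT
      obtain ⟨v, hv, rfl⟩ := List.mem_map.mp hxL
      have hnv : PySem.Str.strip (PySem.Str.lower v) ≠ "" := by
        intro h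
        exact hx0 ((pyCapitalize_eq_empty_iff _).mpr h)
      refine List.mem_map.mpr ⟨PySem.Str.strip (PySem.Str.lower v), ?_, rfl⟩
      refine (PySem.Set.mem_ofList M _).mpr ?_
      rw [hM]
      refine List.mem_filter.mpr ⟨List.mem_map.mpr ⟨v, hv, rfl⟩, by simpa using hnv⟩
    · intro hx
      obtain ⟨u, hu, rfl⟩ := List.mem_map.mp hx
      have hu' := (PySem.Set.mem_ofList M u).mp hu
      have hu0 : u ≠ "" := by
        have := (List.mem_filter.mp hu').2
        simpa using this
      obtain ⟨v, hv, rfl⟩ := List.mem_map.mp (List.mem_of_mem_filter hu')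
      refine ⟨(PySem.List.sorted_perm _ _ _).mem_iff.mpr (List.mem_map.mpr ⟨v, hv, rfl⟩), ?_⟩
      intro h
      exact hu0 ((pyCapitalize_eq_empty_iff _).mp h)
  have hperm : (T.foldl (fun out t =>
      if t ≠ "" ∧ (out = [] ∨ out.getLast? ≠ some t) then out ++ [t] else out) []).Perm
      ((PySem.Set.ofList M).map pyCapitalize) :=
    (List.perm_ext_iff_of_nodup hrnd hsnd).mpr hmem
  exact PySem.List.sorted_eq_of_perm_of_pairwise_lt _ _ _ hperm hp
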